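-- pv_equiv track=rewrite | github.com/user28060/Alignment-of-schema-only-and-instance-only-data | src/schema_instance/schema_instance_gpt/rules.py | validate_Organisation_sub_class_OpenData
-- ===== SOURCE A (Python) =====
-- def validate_Organisation_sub_class_OpenData(values):
--     dataset = [
--         "class1",
--         "class2",
--         "class3",
--     ]  # Example dataset 'OpenData'
--
--     # Rule: Value must be a string
--     if all(isinstance(value, str) for value in values):
--         # Rule: Value must be a valid 'Organisation sub-class' from the dataset
--         if all(value in dataset for value in values):
--             return True
--         else:
--             return False
--     else:
--         return False
-- ===== SOURCE B (Python) =====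
-- def validate_Organisation_sub_class_OpenData(values):
--     allowed = {"class1", "class2", "class3"}
--     for value in values:
--         if not isinstance(value, str) or value not in allowed:
--             return False
--     return True
-- ===== Notes on version B (the rewrite author's own statement) =====
-- stated objective: simpler
-- what changed: Replaced the two separate all(...) passes and nested if/else with a single early-exit loop over values checking a combined predicate against a set of allowed classes.
import Mathlib
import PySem

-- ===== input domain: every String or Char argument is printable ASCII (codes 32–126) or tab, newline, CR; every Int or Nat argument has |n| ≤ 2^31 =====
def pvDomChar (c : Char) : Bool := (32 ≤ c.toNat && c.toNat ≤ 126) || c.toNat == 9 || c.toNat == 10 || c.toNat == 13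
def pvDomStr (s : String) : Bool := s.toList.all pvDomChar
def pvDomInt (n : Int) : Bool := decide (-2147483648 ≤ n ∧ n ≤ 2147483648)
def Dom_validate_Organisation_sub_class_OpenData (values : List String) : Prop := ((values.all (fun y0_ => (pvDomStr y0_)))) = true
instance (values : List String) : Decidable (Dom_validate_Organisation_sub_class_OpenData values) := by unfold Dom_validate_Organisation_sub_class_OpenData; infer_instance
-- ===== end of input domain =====

-- ===== PORT A =====
-- Header: B replaces A's two all(...) passes with a single early-exit loop over values (objective: simpler).
-- In Lean, values : List String, so Python's isinstance(value, str) is constantly true; it is ported as `true`.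
def validate_Organisation_sub_class_OpenData (values : List String) : Bool :=
  let dataset : List String := ["class1", "class2", "class3"]
  if values.all (fun _value => true) then
    if values.all (fun value => dataset.contains value) then true
    else false
  else false

-- ===== PORT B =====
-- B-side helper: the early-exit for-loop of Source B as structural recursion
def pvLoopB (allowed : PySem.Set String) : List String → Bool
  | [] => true
  | value :: rest =>
    if !(true) || !(PySem.Set.contains allowed value) then false
    else pvLoopB allowed rest

def validate_Organisation_sub_class_OpenData_alt (values : List String) : Bool :=
  let allowed : PySem.Set String := PySem.Set.ofList ["class1", "class2", "class3"]
  pvLoopB allowed values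

-- ===== PRECONDITION & SPEC =====
def Spec_validate_Organisation_sub_class_OpenData (values : List String) (out : Bool) : Prop := out = validate_Organisation_sub_class_OpenData_alt values
instance (values : List String) (out : Bool) : Decidable (Spec_validate_Organisation_sub_class_OpenData values out) := by unfold Spec_validate_Organisation_sub_class_OpenData; infer_instance

-- ===== CLAIM (what is proved, stated in full; the proofs are below) =====
def Claim_equal_validate_Organisation_sub_class_OpenData : Prop := ∀ (values : List String), Dom_validate_Organisation_sub_class_OpenData values → Spec_validate_Organisation_sub_class_OpenData values (validate_Organisation_sub_class_OpenData values)

-- ===== LEMMAS AND PROOFS =====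

-- ===== VERDICT (by name: the statement is the Claim_ definition above) =====
theorem pvLoopB_eq_all (allowed : PySem.Set String) (values : List String) :
    pvLoopB allowed values = values.all (fun v => PySem.Set.contains allowed v) := by
  induction values with
  | nil => rfl
  | cons v rest ih => by_cases h : PySem.Set.contains allowed v <;> simp [pvLoopB, List.all_cons, ih, h]

theorem validate_Organisation_sub_class_OpenData_spec : Claim_equal_validate_Organisation_sub_class_OpenData := by
  intro values _
  unfold Spec_validate_Organisation_sub_class_OpenData validate_Organisation_sub_class_OpenData validate_Organisation_sub_class_OpenData_alt
  rw [pvLoopB_eq_all]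
  simp [PySem.Set.ofList, PySem.Set.add, PySem.Set.contains, List.all_eq]
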